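-- pv_equiv track=rewrite | github.com/Geunbaek/algorithm | programmers/징검다리 건너기.py | canCrossBridge
-- ===== SOURCE A (Python) =====
-- def canCrossBridge(stones, k, diff):
--     count = 0
--
--     for stone in stones:
--         if stone - diff <= 0:
--             count += 1
--         else:
--             count = 0
--
--         if count >= k:
--             return False
--     return True
-- ===== SOURCE B (Python) =====
-- def canCrossBridge(stones, k, diff):
--     if not stones:
--         return True
--     n = len(stones)
--     return not any(all(s - diff <= 0 for s in stones[i:i+k])
--                    for i in range(n - k + 1))
-- ===== Notes on version B (the rewrite author's own statement) =====
-- stated objective: alternative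
-- what changed: B tests every length-k window stones[i:i+k] for being all low and returns whether no such window exists, replacing A's single-pass running-counter scan with a window-existence check (nested passes, O(n*k)).
import Mathlib
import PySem

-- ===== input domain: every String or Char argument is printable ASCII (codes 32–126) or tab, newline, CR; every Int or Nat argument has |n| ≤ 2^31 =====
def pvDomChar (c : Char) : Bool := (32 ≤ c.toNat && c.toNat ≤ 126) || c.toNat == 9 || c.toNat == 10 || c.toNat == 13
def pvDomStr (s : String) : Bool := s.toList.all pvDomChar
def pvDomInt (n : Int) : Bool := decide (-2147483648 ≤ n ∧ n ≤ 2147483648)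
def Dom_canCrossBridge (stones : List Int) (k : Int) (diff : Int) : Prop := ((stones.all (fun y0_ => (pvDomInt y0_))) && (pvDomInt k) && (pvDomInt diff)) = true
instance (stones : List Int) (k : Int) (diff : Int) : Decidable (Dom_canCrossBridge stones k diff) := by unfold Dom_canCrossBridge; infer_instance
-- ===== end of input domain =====

-- B checks every length-k window stones[i:i+k] for being all low instead of A's running-counter scan (alternative window-existence decomposition; not faster).


-- ===== PORT A =====
-- A's forward scan: running counter of consecutive low stones, early False when it reaches k.
def canCrossBridgeGo (k diff count : Int) : List Int → Bool
  | [] => true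
  | stone :: rest =>
    let c := if stone - diff ≤ 0 then count + 1 else 0
    if k ≤ c then false else canCrossBridgeGo k diff c rest

def canCrossBridge (stones : List Int) (k : Int) (diff : Int) : Bool :=
  canCrossBridgeGo k diff 0 stones

-- ===== PORT B =====
-- B's window test: all(s - diff <= 0 for s in stones[i:i+k]).
def canCrossBridgeWin (stones : List Int) (k diff i : Int) : Bool :=
  (PySem.List.slice stones (some i) (some (i + k))).all (fun s => decide (s - diff ≤ 0))

-- B's 'any(... for i in range(n - k + 1))': fuel = number of remaining indices, i = current index.
def canCrossBridgeAny (stones : List Int) (k diff : Int) : Nat → Int → Bool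
  | 0, _ => false
  | m + 1, i => canCrossBridgeWin stones k diff i || canCrossBridgeAny stones k diff m (i + 1)

def canCrossBridge_alt (stones : List Int) (k : Int) (diff : Int) : Bool :=
  if stones.isEmpty then true
  else
    let n : Int := stones.length
    !(canCrossBridgeAny stones k diff (n - k + 1).toNat 0)

-- ===== PRECONDITION & SPEC =====
def Spec_canCrossBridge (stones : List Int) (k : Int) (diff : Int) (out : Bool) : Prop := out = canCrossBridge_alt stones k diff
instance (stones : List Int) (k : Int) (diff : Int) (out : Bool) : Decidable (Spec_canCrossBridge stones k diff out) := by unfold Spec_canCrossBridge; infer_instance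

-- ===== CLAIM (what is proved, stated in full; the proofs are below) =====
def Claim_equal_canCrossBridge : Prop := ∀ (stones : List Int) (k : Int) (diff : Int), Dom_canCrossBridge stones k diff → Spec_canCrossBridge stones k diff (canCrossBridge stones k diff)

-- ===== LEMMAS AND PROOFS =====

-- Proof-side scan: (best, lead) = (max low-run length in l, length of l's low prefix).
def canCrossBridgeStep (diff : Int) (st : Int × Int) (stone : Int) : Int × Int :=
  if stone - diff ≤ 0 then
    let lead := st.2 + 1
    (if st.1 < lead then lead else st.1, lead)
  else (st.1, 0)

def canCrossScan (diff : Int) : List Int → Int × Int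
  | [] => (0, 0)
  | x :: xs => canCrossBridgeStep diff (canCrossScan diff xs) x

theorem step_fst (diff b ld x : Int) :
    (canCrossBridgeStep diff (b, ld) x).1 =
      if x - diff ≤ 0 then (if b < ld + 1 then ld + 1 else b) else b := by
  simp only [canCrossBridgeStep]; split_ifs <;> rfl

theorem step_snd (diff b ld x : Int) :
    (canCrossBridgeStep diff (b, ld) x).2 = if x - diff ≤ 0 then ld + 1 else 0 := by
  simp only [canCrossBridgeStep]; split_ifs <;> rfl

-- invariant: 0 ≤ lead ≤ best
theorem canCrossScan_inv (diff : Int) (l : List Int) :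
    0 ≤ (canCrossScan diff l).2 ∧ (canCrossScan diff l).2 ≤ (canCrossScan diff l).1 := by
  induction l with
  | nil => simp [canCrossScan]
  | cons x xs ih =>
    rcases hscan : canCrossScan diff xs with ⟨b, ld⟩
    rw [hscan] at ih
    simp only [canCrossScan, hscan, canCrossBridgeStep]
    split_ifs <;> simp_all <;> omega

theorem canCrossScan_snd_le_length (diff : Int) (l : List Int) :
    (canCrossScan diff l).2 ≤ (l.length : Int) := by
  induction l with
  | nil => simp [canCrossScan]
  | cons x xs ih =>
    rcases hscan : canCrossScan diff xs with ⟨b, ld⟩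
    rw [hscan] at ih
    simp only [canCrossScan, hscan, canCrossBridgeStep, List.length_cons]
    split_ifs <;> simp_all <;> push_cast <;> omega

-- A's running scan in terms of (best, lead).
theorem canCrossGo_eq_scan (k diff : Int) (l : List Int) :
    ∀ c : Int, 0 ≤ c →
      canCrossBridgeGo k diff c l =
        (if l.isEmpty then true else
          decide ((if 0 < (canCrossScan diff l).2
                   then max (canCrossScan diff l).1 (c + (canCrossScan diff l).2)
                   else (canCrossScan diff l).1) < k)) := by
  induction l with
  | nil => intro c _; simp [canCrossBridgeGo]
  | cons x xs ih =>
    intro c hc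
    rcases hscan : canCrossScan diff xs with ⟨b, ld⟩
    have hinv := canCrossScan_inv diff xs
    rw [hscan] at hinv
    simp only at hinv
    have hcons : canCrossScan diff (x :: xs) = canCrossBridgeStep diff (b, ld) x := by
      simp [canCrossScan, hscan]
    simp only [canCrossBridgeGo, hcons, List.isEmpty_cons, Bool.false_eq_true, if_false,
      canCrossBridgeStep]
    cases xs with
    | nil =>
      have hb : b = 0 ∧ ld = 0 := by
        have : ((0 : Int), (0 : Int)) = (b, ld) := by rw [← hscan]; rfl
        injection this with h1 h2
        exact ⟨h1.symm, h2.symm⟩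
      obtain ⟨hb0, hld0⟩ := hb
      subst hb0 hld0
      simp only [canCrossBridgeGo]
      split_ifs <;> simp_all
    | cons y ys =>
      rw [ih (if x - diff ≤ 0 then c + 1 else 0) (by split_ifs <;> omega), hscan]
      simp only [List.isEmpty_cons, Bool.false_eq_true, if_false]
      split_ifs <;> simp_all
      all_goals (try rw [Bool.eq_iff_iff])
      all_goals (try simp only [Bool.and_eq_true, decide_eq_true_eq])
      all_goals omega

-- a prefix of length m is all low iff m ≤ lead
theorem take_all_iff (diff : Int) (l : List Int) :
    ∀ m : Nat, m ≤ l.length →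
      ((l.take m).all (fun s => decide (s - diff ≤ 0)) = true ↔ (m : Int) ≤ (canCrossScan diff l).2) := by
  induction l with
  | nil =>
    intro m hm
    simp only [List.length_nil, Nat.le_zero] at hm
    subst hm
    simp [canCrossScan]
  | cons x xs ih =>
    intro m hm
    rcases hscan : canCrossScan diff xs with ⟨b, ld⟩
    have hinv := canCrossScan_inv diff xs
    rw [hscan] at hinv
    simp only at hinv
    have hcons : canCrossScan diff (x :: xs) = canCrossBridgeStep diff (b, ld) x := by
      simp [canCrossScan, hscan]
    rw [hcons, step_snd]
    cases m with
    | zero =>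
      simp only [List.take_zero, List.all_nil, Nat.cast_zero]
      constructor
      · intro _; split_ifs <;> omega
      · intro _; trivial
    | succ m' =>
      have hm' : m' ≤ xs.length := by simpa using hm
      simp only [List.take_succ_cons, List.all_cons, Bool.and_eq_true, decide_eq_true_eq]
      rw [ih m' hm', hscan]
      simp only
      split_ifs with hl
      · constructor
        · rintro ⟨-, h⟩; push_cast; omega
        · intro h; refine ⟨hl, ?_⟩; push_cast at h; omega
      · constructor
        · rintro ⟨h, -⟩; exact absurd h hl
        · intro h; exfalso; push_cast at h; omega

-- k ≤ best iff some full window of k consecutive stones is all low (k ≥ 1)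
theorem window_iff (diff k : Int) (hk : 1 ≤ k) (l : List Int) :
    k ≤ (canCrossScan diff l).1 ↔
      ∃ j : Nat, j + k.toNat ≤ l.length ∧
        (((l.drop j).take k.toNat).all (fun s => decide (s - diff ≤ 0)) = true) := by
  induction l with
  | nil =>
    simp only [canCrossScan, List.length_nil, List.drop_nil, List.take_nil]
    constructor
    · intro h; exfalso; omega
    · rintro ⟨j, hj, -⟩; exfalso; omega
  | cons x xs ih =>
    rcases hscan : canCrossScan diff xs with ⟨b, ld⟩
    have hinv := canCrossScan_inv diff xs
    rw [hscan] at hinv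
    simp only at hinv
    have hlen := canCrossScan_snd_le_length diff xs
    rw [hscan] at hlen
    simp only at hlen
    have hcons : canCrossScan diff (x :: xs) = canCrossBridgeStep diff (b, ld) x := by
      simp [canCrossScan, hscan]
    rw [hcons, step_fst]
    rw [hscan] at ih
    simp only at ih
    have hktn : k.toNat = (k.toNat - 1) + 1 := by omega
    have htake : (x :: xs).take k.toNat = x :: xs.take (k.toNat - 1) := by
      conv_lhs => rw [hktn]
      rw [List.take_succ_cons]
    have hwin0 : (((x :: xs).take k.toNat).all (fun s => decide (s - diff ≤ 0)) = true) ↔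
        ((x - diff ≤ 0) ∧ ((xs.take (k.toNat - 1)).all (fun s => decide (s - diff ≤ 0)) = true)) := by
      rw [htake, List.all_cons, Bool.and_eq_true, decide_eq_true_eq]
    constructor
    · intro h
      split_ifs at h with hl hmax
      · -- low x, b < ld + 1, so k ≤ ld + 1: the prefix window at j = 0
        refine ⟨0, by simp only [Nat.zero_add, List.length_cons]; omega, ?_⟩
        simp only [List.drop_zero]
        rw [hwin0]
        refine ⟨hl, ?_⟩
        rw [take_all_iff diff xs (k.toNat - 1) (by omega), hscan]
        push_cast; omega
      · obtain ⟨j, hj, hw⟩ := ih.mp h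
        exact ⟨j + 1, by simpa using by omega, by simpa using hw⟩
      · obtain ⟨j, hj, hw⟩ := ih.mp h
        exact ⟨j + 1, by simpa using by omega, by simpa using hw⟩
    · rintro ⟨j, hj, hw⟩
      cases j with
      | zero =>
        simp only [List.drop_zero] at hw
        rw [hwin0] at hw
        obtain ⟨hl, hpre⟩ := hw
        rw [take_all_iff diff xs (k.toNat - 1)
          (by simp only [Nat.zero_add, List.length_cons] at hj; omega), hscan] at hpre
        simp only at hpre
        push_cast at hpre
        split_ifs <;> omega
      | succ j' =>
        have hx : k ≤ b := ih.mpr ⟨j', by simp only [List.length_cons] at hj; omega, by simpa using hw⟩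
        split_ifs <;> omega

-- B's range loop as an existence statement
theorem any_iff (stones : List Int) (k diff : Int) :
    ∀ (m : Nat) (i : Int),
      (canCrossBridgeAny stones k diff m i = true ↔
        ∃ j : Nat, j < m ∧ canCrossBridgeWin stones k diff (i + (j : Int)) = true) := by
  intro m
  induction m with
  | zero => intro i; simp [canCrossBridgeAny]
  | succ m' ih =>
    intro i
    simp only [canCrossBridgeAny, Bool.or_eq_true, ih (i + 1)]
    constructor
    · rintro (h | ⟨j, hj, hw⟩)
      · exact ⟨0, by omega, by simpa using h⟩
      · refine ⟨j + 1, by omega, ?_⟩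
        have : i + 1 + (j : Int) = i + ((j + 1 : Nat) : Int) := by push_cast; ring
        rwa [this] at hw
    · rintro ⟨j, hj, hw⟩
      cases j with
      | zero => left; simpa using hw
      | succ j' =>
        right
        refine ⟨j', by omega, ?_⟩
        have : i + ((j' + 1 : Nat) : Int) = i + 1 + (j' : Int) := by push_cast; ring
        rwa [this] at hw

-- the window at a natural start with k ≥ 1 is a drop/take
theorem win_nat (stones : List Int) (k diff : Int) (hk : 1 ≤ k) (j : Nat) :
    canCrossBridgeWin stones k diff (j : Int) =
      ((stones.drop j).take k.toNat).all (fun s => decide (s - diff ≤ 0)) := by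
  unfold canCrossBridgeWin
  have h : (j : Int) + k = (j : Int) + ((k.toNat : Nat) : Int) := by omega
  rw [h, PySem.List.slice_natCast_add]

-- the window starting at the end of the list is empty, hence all-low
theorem win_end (stones : List Int) (k diff : Int) :
    canCrossBridgeWin stones k diff (stones.length : Int) = true := by
  unfold canCrossBridgeWin
  have hlen : (PySem.List.slice stones (some (stones.length : Int))
      (some ((stones.length : Int) + k))).length = 0 := by
    rw [PySem.List.length_slice]
    have h1 := PySem.List.clampIdx_le stones.length ((stones.length : Int) + k)
    have h2 : PySem.List.clampIdx stones.length ((stones.length : Nat) : Int) = stones.length := by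
      rw [PySem.List.clampIdx_natCast]; omega
    omega
  rw [List.length_eq_zero_iff] at hlen
  rw [hlen]
  rfl

-- ===== VERDICT (by name: the statement is the Claim_ definition above) =====
theorem canCrossBridge_spec : Claim_equal_canCrossBridge := by
  intro stones k diff _
  unfold Spec_canCrossBridge canCrossBridge canCrossBridge_alt
  cases hst : stones with
  | nil => simp [canCrossBridgeGo]
  | cons x xs =>
    rw [canCrossGo_eq_scan k diff (x :: xs) 0 le_rfl]
    rcases hscan : canCrossScan diff (x :: xs) with ⟨b, ld⟩
    have hinv := canCrossScan_inv diff (x :: xs)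
    rw [hscan] at hinv
    simp only at hinv
    simp only [List.isEmpty_cons, Bool.false_eq_true, if_false]
    have hA : (if 0 < ld then max b (0 + ld) else b) = b := by
      split_ifs with h
      · rw [zero_add]; exact max_eq_left hinv.2
      · rfl
    rw [hA]
    set n : Int := ((x :: xs).length : Int) with hn
    by_cases hk : 1 ≤ k
    · -- k ≥ 1: compare to window existence
      have hwiff := window_iff diff k hk (x :: xs)
      rw [hscan] at hwiff
      simp only at hwiff
      have hany : canCrossBridgeAny (x :: xs) k diff (n - k + 1).toNat 0 = decide (k ≤ b) := by
        rw [Bool.eq_iff_iff, any_iff, decide_eq_true_eq, hwiff]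
        constructor
        · rintro ⟨j, hj, hw⟩
          rw [zero_add, win_nat _ _ _ hk] at hw
          exact ⟨j, by omega, hw⟩
        · rintro ⟨j, hj, hw⟩
          refine ⟨j, by omega, ?_⟩
          rw [zero_add, win_nat _ _ _ hk]
          exact hw
      rw [hany, Bool.eq_iff_iff]
      simp only [decide_eq_true_eq, Bool.not_eq_eq_eq_not, Bool.not_true,
        decide_eq_false_iff_not]
      omega
    · -- k ≤ 0: A is false, and the empty window at i = n makes B false too
      have hA0 : decide (b < k) = false := by
        simp only [decide_eq_false_iff_not, not_lt]; omega
      have hB0 : canCrossBridgeAny (x :: xs) k diff (n - k + 1).toNat 0 = true := by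
        rw [any_iff]
        refine ⟨(x :: xs).length, by omega, ?_⟩
        rw [zero_add]
        exact win_end (x :: xs) k diff
      rw [hA0, hB0]
      rfl
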